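-- pv_equiv track=rewrite | github.com/DragunWF/Competitive-Programming | CodeWars/python/6_kyu/consecutive_count.py | get_consective_items
-- ===== SOURCE A (Python) =====
-- from typing import Union
--
-- def get_consective_items(items: Union[str, int], key: Union[str, int]) -> int:
--     max_consecutive_count = 0
--     current_consecutive_count = 0
--     standardized_item = str(items)
--     standardized_key = str(key)
--     for i, char in enumerate(standardized_item):
--         if char == standardized_key:
--             if current_consecutive_count == 0:
--                 current_consecutive_count = 1
--             elif standardized_item[i - 1] == standardized_key:
--                 current_consecutive_count += 1
--         else:
--             if current_consecutive_count > max_consecutive_count: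
--                 max_consecutive_count = current_consecutive_count
--             current_consecutive_count = 0
--     if current_consecutive_count > max_consecutive_count:
--         max_consecutive_count = current_consecutive_count
--     return max_consecutive_count
-- ===== SOURCE B (Python) =====
-- def get_consective_items(items, key):
--     standardized_item = str(items)
--     standardized_key = str(key)
--     s = standardized_item
--     runs = []
--     i = 0
--     while i < len(s):
--         j = i
--         while j < len(s) and s[j] == s[i]:
--             j += 1
--         runs.append((s[i], j - i))
--         i = j
--     return max((n for ch, n in runs if ch == standardized_key), default=0)
-- ===== Notes on version B (the rewrite author's own statement) =====
-- stated objective: alternative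
-- what changed: Replaces the incremental counter scan (with its look-back at s[i-1]) by a groupby-style decomposition: split the string into maximal runs of equal characters first, then take the max length over the runs whose character equals the key.
import Mathlib
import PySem

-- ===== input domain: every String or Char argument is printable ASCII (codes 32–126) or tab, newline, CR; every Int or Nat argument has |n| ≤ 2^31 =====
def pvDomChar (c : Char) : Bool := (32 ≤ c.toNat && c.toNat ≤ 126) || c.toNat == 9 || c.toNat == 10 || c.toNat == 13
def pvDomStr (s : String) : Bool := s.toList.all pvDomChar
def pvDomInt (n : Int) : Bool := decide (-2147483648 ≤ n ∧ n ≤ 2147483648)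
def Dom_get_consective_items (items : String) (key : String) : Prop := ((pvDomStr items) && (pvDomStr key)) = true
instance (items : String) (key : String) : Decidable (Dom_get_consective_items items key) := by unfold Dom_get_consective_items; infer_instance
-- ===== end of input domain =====

-- B replaces A's incremental counter scan by a groupby-style run decomposition
-- (split into maximal runs of equal characters, then max length over matching runs);
-- an alternative of the same cost, not claimed faster.

-- ===== PORT A =====
-- Python string equality of 1-char strings is compared on code points: `char == key`
-- is ported as `[ch] == k` with k = key.toList (exact: Python str equality is
-- code-point list equality).  The loop state is (max_consecutive_count, current_consecutive_count);
-- `standardized_item[i - 1]` is PySem.List.pyGet? on the full char list (negative wrap exact).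
def pvLoopA (s k : List Char) : List Char → Int → Int × Int → Int × Int
  | [], _, st => st
  | ch :: rest, i, (maxc, cur) =>
    let st' :=
      if [ch] == k then
        if cur == 0 then (maxc, (1 : Int))
        else if ((PySem.List.pyGet? s (i - 1)).map (fun c => [c])) == some k then (maxc, cur + 1)
        else (maxc, cur)
      else
        if cur > maxc then (cur, (0 : Int)) else (maxc, (0 : Int))
    pvLoopA s k rest (i + 1) st'

def get_consective_items (items : String) (key : String) : Int :=
  let st := pvLoopA items.toList key.toList items.toList 0 (0, 0)
  if st.2 > st.1 then st.2 else st.1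

-- ===== PORT B =====
-- Source B's outer while loop emits, left to right, each maximal run (character, length);
-- the inner `while s[j] == s[i]` scan is takeWhile/dropWhile on the rest of the list.
def pvRuns : List Char → List (Char × Nat)
  | [] => []
  | c :: rest =>
      (c, (rest.takeWhile (fun d => d == c)).length + 1) ::
        pvRuns (rest.dropWhile (fun d => d == c))
  termination_by l => l.length
  decreasing_by
    simp only [List.length_cons]
    exact Nat.lt_succ_of_le (List.length_dropWhile_le _ _)

-- Source B's `max((n for ch, n in runs if ch == k), default=0)` = fold max over the
-- filtered run list starting from the default 0 (all run lengths are positive).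
def get_consective_items_alt (items : String) (key : String) : Int :=
  ((pvRuns items.toList).filter (fun p => [p.1] == key.toList)).foldl
    (fun acc p => max acc ((p.2 : Int))) 0

-- ===== PRECONDITION & SPEC =====
def Spec_get_consective_items (items : String) (key : String) (out : Int) : Prop := out = get_consective_items_alt items key
instance (items : String) (key : String) (out : Int) : Decidable (Spec_get_consective_items items key out) := by unfold Spec_get_consective_items; infer_instance

-- ===== CLAIM (what is proved, stated in full; the proofs are below) =====
def Claim_equal_get_consective_items : Prop := ∀ (items : String) (key : String), Dom_get_consective_items items key → Spec_get_consective_items items key (get_consective_items items key)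

-- ===== LEMMAS AND PROOFS =====

-- the state machine A's loop actually computes (the elif's look-back always succeeds)
def pvScan (k : List Char) : List Char → Int → Int → Int
  | [], maxc, cur => max maxc cur
  | c :: t, maxc, cur =>
      if [c] == k then pvScan k t maxc (cur + 1) else pvScan k t (max maxc cur) 0

-- B's value on a char list
def pvBres (k : List Char) (l : List Char) : Int :=
  ((pvRuns l).filter (fun p => [p.1] == k)).foldl (fun acc p => max acc ((p.2 : Int))) 0

theorem pv_foldl_max_shift (l : List (Char × Nat)) (a b : Int) :
    l.foldl (fun acc p => max acc ((p.2 : Int))) (max a b)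
      = max a (l.foldl (fun acc p => max acc ((p.2 : Int))) b) := by
  induction l generalizing b with
  | nil => rfl
  | cons p l ih => simpa [List.foldl_cons, max_assoc] using ih (max b (p.2 : Int))

theorem pvBres_nonneg (k l : List Char) : 0 ≤ pvBres k l := by
  unfold pvBres
  have h := pv_foldl_max_shift ((pvRuns l).filter (fun p => [p.1] == k)) 0 0
  simp only [max_self] at h
  rw [h]; exact le_max_left _ _

theorem pvBres_cons (k : List Char) (c : Char) (t : List Char) :
    pvBres k (c :: t)
      = if [c] = k
          then max (((t.takeWhile (fun d => d == c)).length + 1 : Nat) : Int)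
                   (pvBres k (t.dropWhile (fun d => d == c)))
          else pvBres k (t.dropWhile (fun d => d == c)) := by
  unfold pvBres
  rw [pvRuns]
  by_cases h : [c] = k
  · have h2 := pv_foldl_max_shift
      ((pvRuns (t.dropWhile (fun d => d == c))).filter (fun p => [p.1] == k))
      (((t.takeWhile (fun d => d == c)).length + 1 : Nat) : Int) 0
    simp [h, List.foldl_cons] at h2 ⊢
    simpa [max_comm] using h2
  · simp [h]

theorem pvBres_cons_nonmatch (k : List Char) (c : Char) (t : List Char)
    (h : ¬ [c] = k) : pvBres k (c :: t) = pvBres k t := by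
  rw [pvBres_cons, if_neg h]
  cases t with
  | nil => rfl
  | cons d t' =>
    by_cases hd : d = c
    · subst hd
      rw [pvBres_cons, if_neg h]
      simp
    · simp [hd]

-- peeling the leading matching run off pvBres
theorem pvBres_lead (k : List Char) (t : List Char) :
    pvBres k t
      = max (((t.takeWhile (fun d => [d] == k)).length : Nat) : Int)
            (pvBres k (t.dropWhile (fun d => [d] == k))) := by
  cases t with
  | nil => simp [pvBres, pvRuns]
  | cons c t' =>
    by_cases h : [c] = k
    · have hpred : (fun d : Char => [d] == k) = (fun d => d == c) := by
        funext d
        subst h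
        by_cases hd : d = c <;> simp [hd]
      have htw : t'.takeWhile (fun d => [d] == k) = t'.takeWhile (fun d => d == c) := by
        rw [hpred]
      have hdw : t'.dropWhile (fun d => [d] == k) = t'.dropWhile (fun d => d == c) := by
        rw [hpred]
      rw [pvBres_cons, if_pos h]
      simp [h, htw, hdw]
    · have hc : ([c] == k) = false := by simpa using h
      simp only [List.takeWhile_cons, List.dropWhile_cons, hc, Bool.false_eq_true,
        if_false, List.length_nil, Nat.cast_zero]
      rw [pvBres_cons_nonmatch k c t' h]
      have := pvBres_nonneg k t'
      omega

-- the scan equals: max of the accumulator, the current run extended by the leading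
-- matching block, and B's answer on the remainder
theorem pvScan_eq (k : List Char) (t : List Char) (maxc cur : Int)
    (hm : 0 ≤ maxc) (hc : 0 ≤ cur) :
    pvScan k t maxc cur
      = max maxc (max (cur + ((t.takeWhile (fun d => [d] == k)).length : Int))
                      (pvBres k (t.dropWhile (fun d => [d] == k)))) := by
  induction t generalizing maxc cur with
  | nil =>
    simp [pvScan, pvBres, pvRuns]
    omega
  | cons c t' ih =>
    by_cases h : [c] = k
    · have hb : ([c] == k) = true := by simpa using h
      rw [pvScan, if_pos hb]
      rw [ih maxc (cur + 1) hm (by omega)]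
      simp [hb]
      omega
    · have hb : ([c] == k) = false := by simpa using h
      rw [pvScan, if_neg (by simp [hb])]
      rw [ih (max maxc cur) 0 (by omega) le_rfl]
      have hlead : pvBres k (c :: t')
          = max ((t'.takeWhile (fun d => [d] == k)).length : Int)
                (pvBres k (t'.dropWhile (fun d => [d] == k))) := by
        rw [pvBres_cons_nonmatch k c t' h]
        exact pvBres_lead k t'
      simp only [List.takeWhile_cons, List.dropWhile_cons, hb, Bool.false_eq_true,
        if_false, List.length_nil, Nat.cast_zero]
      rw [hlead]
      omega

-- A's loop, run on the suffix t of pre ++ t at index pre.length, computes pvScan: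
-- when cur ≠ 0 the previous character (the last of pre) matched, so the elif succeeds.
theorem pvLoopA_eq (k : List Char) (t pre : List Char) (maxc cur : Int)
    (hc : 0 ≤ cur)
    (hinv : cur ≠ 0 → ∃ c, pre.getLast? = some c ∧ [c] = k) :
    (fun st : Int × Int => max st.1 st.2)
        (pvLoopA (pre ++ t) k t (pre.length) (maxc, cur))
      = pvScan k t maxc cur := by
  induction t generalizing pre maxc cur with
  | nil => simp [pvLoopA, pvScan]
  | cons ch rest ih =>
    rw [pvLoopA, pvScan]
    by_cases h : [ch] = k
    · have hb : ([ch] == k) = true := by simpa using h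
      rw [if_pos hb, if_pos hb]
      by_cases h0 : cur = 0
      · subst h0
        simp only [if_pos (by simp : ((0 : Int) == 0) = true)]
        have hstep := ih (pre ++ [ch]) maxc 1 (by omega)
          (fun _ => ⟨ch, by simp, h⟩)
        simpa [List.append_assoc] using hstep
      · rw [if_neg (by simpa using h0)]
        obtain ⟨c, hlast, hck⟩ := hinv h0
        have hpre : pre ≠ [] := by
          intro hnil; rw [hnil] at hlast; simp at hlast
        have hlen : 1 ≤ pre.length := List.length_pos_of_ne_nil hpre
        have hget : PySem.List.pyGet? (pre ++ ch :: rest) ((pre.length : Int) - 1)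
            = some c := by
          have h1 : ((pre.length : Int) - 1) = ((pre.length - 1 : Nat) : Int) := by
            omega
          rw [h1, PySem.List.pyGet?_natCast]
          rw [List.getElem?_append_left (by omega)]
          rw [← List.getLast?_eq_getElem?]
          exact hlast
        rw [if_pos (by simp [hget, hck])]
        have hstep := ih (pre ++ [ch]) maxc (cur + 1) (by omega)
          (fun _ => ⟨ch, by simp, h⟩)
        simpa [List.append_assoc] using hstep
    · have hb : ([ch] == k) = false := by simpa using h
      simp only [hb, Bool.false_eq_true, if_false]
      have hsplit : (if cur > maxc then (cur, (0:Int)) else (maxc, (0:Int)))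
          = (max maxc cur, (0:Int)) := by
        split_ifs with hgt
        · simp [max_eq_right (le_of_lt hgt)]
        · simp [max_eq_left (by omega : cur ≤ maxc)]
      rw [hsplit]
      have hstep := ih (pre ++ [ch]) (max maxc cur) 0 le_rfl
        (fun hne => absurd rfl hne)
      simpa [List.append_assoc] using hstep

-- ===== VERDICT (by name: the statement is the Claim_ definition above) =====
theorem get_consective_items_spec : Claim_equal_get_consective_items := by
  intro items key _
  unfold Spec_get_consective_items get_consective_items
  set s := items.toList with hs
  set k := key.toList with hk
  have hA : (if (pvLoopA s k s 0 (0, 0)).2 > (pvLoopA s k s 0 (0, 0)).1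
              then (pvLoopA s k s 0 (0, 0)).2 else (pvLoopA s k s 0 (0, 0)).1)
      = pvScan k s 0 0 := by
    have h := pvLoopA_eq k s [] 0 0 le_rfl (fun hne => absurd rfl hne)
    simp only [List.nil_append, List.length_nil, Nat.cast_zero] at h
    rw [← h]
    have : ∀ a b : Int, (if b > a then b else a) = max a b := by
      intro a b; split_ifs <;> omega
    exact this _ _
  have hB : get_consective_items_alt items key = pvBres k s := rfl
  rw [hA, hB]
  rw [pvScan_eq k s 0 0 le_rfl le_rfl]
  rw [pvBres_lead k s]
  have h1 : (0 : Int) ≤ ((s.takeWhile (fun d => [d] == k)).length : Int) := by positivity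
  have h2 := pvBres_nonneg k (s.dropWhile (fun d => [d] == k))
  omega
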